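-- pv_equiv track=rewrite | github.com/acybppres/Lothar | Collatz/kenglish/mrlattice.py | prefixForModClass
-- ===== SOURCE A (Python) =====
-- def prefixForModClass(power_of_2, n):
--     mod = n % 4
--     prefix = ["11", "01", "10", "00"][mod]
--     if power_of_2 > 2:
--         a = 3
--         while a <= power_of_2:
--             p2 = 2**(a)
--             mod = n % p2
--             exemplar = p2 + mod
--             bits = []
--             while exemplar != 1:
--                 if (exemplar & 1) == 0:
--                     bits.append("1")
--                     exemplar = exemplar // 2
--                 else:
--                     bits.append("0")
--                     exemplar = (3 * exemplar + 1) // 2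
--             next_bit = bits[a-1]
--             prefix = prefix + next_bit
--             a = a+1
--     return prefix
-- ===== SOURCE B (Python) =====
-- def prefixForModClass(power_of_2, n):
--     # One Collatz pass of length P from 2**P + (n mod 2**P): by prefix-consistency
--     # of parity vectors, bit i of this single trajectory equals the bit A extracts
--     # from its own trajectory of 2**(i+1) + (n mod 2**(i+1)).
--     P = power_of_2 if power_of_2 > 2 else 2
--     p2 = 2 ** P
--     s = p2 + (n % p2)
--     out = []
--     for _ in range(P):
--         if s % 2 == 0:
--             out.append("1")
--             s //= 2
--         else:
--             out.append("0")
--             s = (3 * s + 1) // 2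
--     return "".join(out)
-- ===== Notes on version B (the rewrite author's own statement) =====
-- stated objective: faster
-- what changed: Instead of running a full Collatz trajectory down to 1 for every modulus 2^a (a = 3..P) and reading one bit of each, B runs a single length-P Collatz pass from 2**P + (n mod 2**P) and emits one parity bit per step, which agrees with A by prefix-consistency of parity vectors.
import Mathlib
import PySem

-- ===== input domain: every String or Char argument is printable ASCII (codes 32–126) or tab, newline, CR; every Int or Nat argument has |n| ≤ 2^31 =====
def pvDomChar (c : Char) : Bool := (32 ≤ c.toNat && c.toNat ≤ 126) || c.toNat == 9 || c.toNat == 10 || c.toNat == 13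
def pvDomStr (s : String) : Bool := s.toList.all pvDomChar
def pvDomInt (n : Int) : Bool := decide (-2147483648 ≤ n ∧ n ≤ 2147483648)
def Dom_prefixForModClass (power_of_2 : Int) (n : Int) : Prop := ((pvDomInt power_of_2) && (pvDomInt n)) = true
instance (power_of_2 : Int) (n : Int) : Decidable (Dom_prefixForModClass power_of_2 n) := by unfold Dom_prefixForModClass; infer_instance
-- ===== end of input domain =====

-- B replaces A's quadratic family of Collatz trajectories (one full run to 1 per bit)
-- by a single Collatz pass of length P, using prefix-consistency of parity vectors;
-- objective: faster (asymptotic).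


-- ===== PORT A =====
-- inner `while exemplar != 1` loop of A; the fuel argument only makes the recursion
-- total (the loop's termination in general is the Collatz conjecture) and is chosen
-- large enough that the index a-1 read from `bits` is always below the bits produced,
-- so the returned value is the one Python A returns whenever Python A returns.
def pvBitsA (fuel : Nat) (exemplar : Int) (bits : List String) : List String :=
  match fuel with
  | 0 => bits
  | f + 1 =>
    if exemplar = 1 then bits
    else if PySem.Int.band exemplar 1 = 0 then        -- (exemplar & 1) == 0
      pvBitsA f (PySem.Int.floordiv exemplar 2) (bits ++ ["1"])   -- exemplar // 2
    else
      pvBitsA f (PySem.Int.floordiv (3 * exemplar + 1) 2) (bits ++ ["0"])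

-- outer `while a <= power_of_2` loop of A
def pvOuterA (power_of_2 n : Int) (a : Int) (pre : String) : String :=
  if h : a ≤ power_of_2 then
    let p2 : Int := 2 ^ a.toNat                        -- 2**a (a ≥ 3 at every call)
    let m := PySem.Int.mod n p2                        -- n % p2
    let exemplar := p2 + m
    let bits := pvBitsA (exemplar.toNat * 100 + 1000) exemplar []
    let next_bit := (PySem.List.pyGet? bits (a - 1)).getD ""   -- bits[a-1] (always in range)
    pvOuterA power_of_2 n (a + 1) (pre ++ next_bit)
  else pre
termination_by (power_of_2 + 1 - a).toNat
decreasing_by omega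

def prefixForModClass (power_of_2 : Int) (n : Int) : String :=
  let m := PySem.Int.mod n 4
  let pre := (PySem.List.pyGet? ["11", "01", "10", "00"] m).getD ""  -- m ∈ [0,4): always in range
  if power_of_2 > 2 then pvOuterA power_of_2 n 3 pre else pre

-- ===== PORT B =====
-- the single pass of length P: one parity bit and one Collatz step per iteration
def pvBitsB (k : Nat) (s : Int) : List String :=
  match k with
  | 0 => []
  | k + 1 =>
    if PySem.Int.mod s 2 = 0 then
      "1" :: pvBitsB k (PySem.Int.floordiv s 2)
    else
      "0" :: pvBitsB k (PySem.Int.floordiv (3 * s + 1) 2)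

def prefixForModClass_alt (power_of_2 : Int) (n : Int) : String :=
  let P : Nat := if power_of_2 > 2 then power_of_2.toNat else 2
  let p2 : Int := 2 ^ P
  let s := p2 + PySem.Int.mod n p2
  PySem.Str.join "" (pvBitsB P s)

-- ===== PRECONDITION & SPEC =====
def Spec_prefixForModClass (power_of_2 : Int) (n : Int) (out : String) : Prop := out = prefixForModClass_alt power_of_2 n
instance (power_of_2 : Int) (n : Int) (out : String) : Decidable (Spec_prefixForModClass power_of_2 n out) := by unfold Spec_prefixForModClass; infer_instance

-- ===== CLAIM (what is proved, stated in full; the proofs are below) =====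
def Claim_equal_prefixForModClass : Prop := ∀ (power_of_2 : Int) (n : Int), Dom_prefixForModClass power_of_2 n → Spec_prefixForModClass power_of_2 n (prefixForModClass power_of_2 n)

-- ===== LEMMAS AND PROOFS =====

-- the Collatz step (accelerated T-map) as both ports perform it
def pvT (s : Int) : Int :=
  if PySem.Int.mod s 2 = 0 then PySem.Int.floordiv s 2
  else PySem.Int.floordiv (3 * s + 1) 2

def pvBit (s : Int) : String := if PySem.Int.mod s 2 = 0 then "1" else "0"

theorem pvBitsB_succ (k : Nat) (s : Int) :
    pvBitsB (k + 1) s = pvBit s :: pvBitsB k (pvT s) := by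
  simp only [pvBitsB, pvBit, pvT]; split <;> rfl

theorem pvBitsB_length (k : Nat) (s : Int) : (pvBitsB k s).length = k := by
  induction k generalizing s with
  | zero => rfl
  | succ k ih => rw [pvBitsB_succ]; simp [ih]

-- the split of one pass into a prefix pass and a continuation
theorem pvBitsB_add (m k : Nat) (s : Int) :
    pvBitsB (m + k) s = pvBitsB m s ++ pvBitsB k (pvT^[m] s) := by
  induction m generalizing s with
  | zero => simp [pvBitsB]
  | succ m ih =>
      have h1 : m + 1 + k = (m + k) + 1 := by omega
      rw [h1, pvBitsB_succ, pvBitsB_succ, ih, Function.iterate_succ_apply]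
      rfl

-- congruence of the Collatz step modulo halved powers of two
theorem pvT_congr (k : Nat) (s t : Int)
    (h : s % (2 ^ (k + 1)) = t % (2 ^ (k + 1))) :
    PySem.Int.mod s 2 = PySem.Int.mod t 2 ∧ pvT s % (2 ^ k) = pvT t % (2 ^ k) := by
  have h2 : PySem.Int.mod s 2 = s % 2 := PySem.Int.mod_eq_emod_of_pos (by norm_num)
  have h2' : PySem.Int.mod t 2 = t % 2 := PySem.Int.mod_eq_emod_of_pos (by norm_num)
  have hpow : ((2 : Int) ^ (k + 1)) = 2 * 2 ^ k := by ring
  obtain ⟨c, hc⟩ : ((2 : Int) ^ (k + 1)) ∣ (s - t) :=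
    Int.dvd_of_emod_eq_zero (Int.emod_eq_emod_iff_emod_sub_eq_zero.mp h)
  have hc2 : s - t = 2 * (2 ^ k * c) := by rw [hc, hpow]; ring
  have hpar : s % 2 = t % 2 := by
    refine Int.emod_eq_emod_iff_emod_sub_eq_zero.mpr (Int.emod_eq_zero_of_dvd ?_)
    exact ⟨2 ^ k * c, hc2⟩
  refine ⟨by rw [h2, h2', hpar], ?_⟩
  unfold pvT
  rw [h2, h2', hpar]
  by_cases hp : t % 2 = 0
  · rw [if_pos hp, if_pos hp]
    obtain ⟨u, hu⟩ : (2 : Int) ∣ s := Int.dvd_of_emod_eq_zero (by omega)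
    obtain ⟨v, hv⟩ : (2 : Int) ∣ t := Int.dvd_of_emod_eq_zero hp
    have hds : PySem.Int.floordiv s 2 = u := by
      rw [PySem.Int.floordiv_eq_ediv_of_pos (by norm_num), hu, Int.mul_ediv_cancel_left _ (by norm_num)]
    have hdt : PySem.Int.floordiv t 2 = v := by
      rw [PySem.Int.floordiv_eq_ediv_of_pos (by norm_num), hv, Int.mul_ediv_cancel_left _ (by norm_num)]
    rw [hds, hdt]
    refine Int.emod_eq_emod_iff_emod_sub_eq_zero.mpr (Int.emod_eq_zero_of_dvd ⟨c, by omega⟩)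
  · rw [if_neg hp, if_neg hp]
    obtain ⟨u, hu⟩ : ∃ u, s = 2 * u + 1 := ⟨s / 2, by omega⟩
    obtain ⟨v, hv⟩ : ∃ v, t = 2 * v + 1 := ⟨t / 2, by omega⟩
    have hds : PySem.Int.floordiv (3 * s + 1) 2 = 3 * u + 2 := by
      rw [PySem.Int.floordiv_eq_ediv_of_pos (by norm_num)]
      have h3 : 3 * s + 1 = 2 * (3 * u + 2) := by omega
      rw [h3, Int.mul_ediv_cancel_left _ (by norm_num)]
    have hdt : PySem.Int.floordiv (3 * t + 1) 2 = 3 * v + 2 := by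
      rw [PySem.Int.floordiv_eq_ediv_of_pos (by norm_num)]
      have h3 : 3 * t + 1 = 2 * (3 * v + 2) := by omega
      rw [h3, Int.mul_ediv_cancel_left _ (by norm_num)]
    rw [hds, hdt]
    have hr : 2 ^ k * (3 * c) = 3 * (2 ^ k * c) := by ring
    refine Int.emod_eq_emod_iff_emod_sub_eq_zero.mpr (Int.emod_eq_zero_of_dvd ⟨3 * c, by omega⟩)

-- prefix-consistency: the first k parity bits only depend on the start mod 2^k
theorem pvBitsB_congr (k : Nat) (s t : Int)
    (h : s % (2 ^ k) = t % (2 ^ k)) : pvBitsB k s = pvBitsB k t := by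
  induction k generalizing s t with
  | zero => rfl
  | succ k ih =>
      obtain ⟨hp, hT⟩ := pvT_congr k s t h
      rw [pvBitsB_succ, pvBitsB_succ, pvBit, pvBit, hp, ih _ _ hT]

-- A's inner loop only ever appends to its accumulator
theorem pvBitsA_mono (f : Nat) (s : Int) (acc : List String) :
    ∃ r, pvBitsA f s acc = acc ++ r := by
  induction f generalizing s acc with
  | zero => exact ⟨[], (List.append_nil acc).symm⟩
  | succ f ih =>
      unfold pvBitsA
      split
      · exact ⟨[], by rw [List.append_nil]⟩
      split
      · obtain ⟨r, hr⟩ := ih (PySem.Int.floordiv s 2) (acc ++ ["1"])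
        exact ⟨"1" :: r, by rw [hr, List.append_assoc]; rfl⟩
      · obtain ⟨r, hr⟩ := ih (PySem.Int.floordiv (3 * s + 1) 2) (acc ++ ["0"])
        exact ⟨"0" :: r, by rw [hr, List.append_assoc]; rfl⟩

-- the step keeps the lower bound 2^a
theorem pvT_lower (a : Nat) (s : Int) (h : 2 ^ (a + 1) ≤ s) : 2 ^ a ≤ pvT s := by
  have hpow : ((2 : Int) ^ (a + 1)) = 2 * 2 ^ a := by ring
  have hq : (0 : Int) < 2 ^ a := pow_pos (by norm_num) a
  unfold pvT
  split
  · rw [PySem.Int.floordiv_eq_ediv_of_pos (by norm_num), Int.le_ediv_iff_mul_le (by norm_num)]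
    omega
  · rw [PySem.Int.floordiv_eq_ediv_of_pos (by norm_num), Int.le_ediv_iff_mul_le (by norm_num)]
    omega

-- A's loop from s ≥ 2^a with fuel ≥ a produces B's first a bits as a prefix
theorem pvBitsA_prefix (a : Nat) (f : Nat) (s : Int) (acc : List String)
    (hf : a ≤ f) (hs : (2 : Int) ^ a ≤ s) :
    ∃ r, pvBitsA f s acc = acc ++ pvBitsB a s ++ r := by
  induction a generalizing f s acc with
  | zero =>
      obtain ⟨r, hr⟩ := pvBitsA_mono f s acc
      exact ⟨r, by simpa [pvBitsB] using hr⟩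
  | succ a ih =>
      obtain ⟨f', rfl⟩ : ∃ f', f = f' + 1 := ⟨f - 1, by omega⟩
      have hs1 : s ≠ 1 := by
        have : (2 : Int) ^ (a + 1) ≥ 2 := by
          calc (2:Int) ^ (a+1) ≥ 2 ^ 1 := by
                exact pow_le_pow_right₀ (by norm_num) (by omega)
            _ = 2 := by norm_num
        omega
      have hT : (2 : Int) ^ a ≤ pvT s := pvT_lower a s hs
      rw [pvBitsB_succ]
      simp only [pvBitsA]
      rw [if_neg hs1, PySem.Int.band_one]
      by_cases hp : PySem.Int.mod s 2 = 0
      · have hTe : pvT s = PySem.Int.floordiv s 2 := by unfold pvT; rw [if_pos hp]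
        rw [if_pos hp]
        obtain ⟨r, hr⟩ := ih f' (PySem.Int.floordiv s 2) (acc ++ ["1"]) (by omega) (hTe ▸ hT)
        refine ⟨r, ?_⟩
        rw [hr, pvBit, if_pos hp, hTe]
        simp only [List.append_assoc, List.cons_append, List.nil_append]
      · have hTe : pvT s = PySem.Int.floordiv (3 * s + 1) 2 := by unfold pvT; rw [if_neg hp]
        rw [if_neg hp]
        obtain ⟨r, hr⟩ := ih f' (PySem.Int.floordiv (3 * s + 1) 2) (acc ++ ["0"]) (by omega) (hTe ▸ hT)
        refine ⟨r, ?_⟩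
        rw [hr, pvBit, if_neg hp, hTe]
        simp only [List.append_assoc, List.cons_append, List.nil_append]

-- "".join distributes over cons
theorem pvJoin_cons (x : String) (xs : List String) :
    PySem.Str.join "" (x :: xs) = x ++ PySem.Str.join "" xs := by
  rw [← String.toList_inj]
  rw [String.toList_append, PySem.Str.toList_join, PySem.Str.toList_join]
  cases xs with
  | nil =>
      rw [List.map_cons, List.map_nil, PySem.Chars.join_singleton, PySem.Chars.join_nil,
        List.append_nil]
  | cons y ys =>
      rw [List.map_cons, List.map_cons, PySem.Chars.join_cons_cons]
      simp

theorem pvJoin_append (xs ys : List String) :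
    PySem.Str.join "" (xs ++ ys) = PySem.Str.join "" xs ++ PySem.Str.join "" ys := by
  induction xs with
  | nil =>
      have : PySem.Str.join "" ([] : List String) = "" := rfl
      simp [this]
  | cons x xs ih => simp [pvJoin_cons, ih, String.append_assoc]

-- adding a multiple of 2^PN does not change residues mod 2^aN ≤ 2^PN
theorem pvMod_pow (n : Int) (aN PN : Nat) (hle : aN ≤ PN) :
    ((2 : Int) ^ PN + n % 2 ^ PN) % 2 ^ aN = n % 2 ^ aN := by
  have hd : ((2 : Int) ^ aN) ∣ 2 ^ PN := pow_dvd_pow 2 hle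
  obtain ⟨c, hc⟩ := hd
  rw [hc, add_comm, Int.add_mul_emod_self_left, Int.emod_emod_of_dvd n ⟨c, rfl⟩]

-- the first two parity bits are A's table entry
theorem pvTable (n : Int) :
    (PySem.List.pyGet? ["11", "01", "10", "00"] (PySem.Int.mod n 4)).getD ""
      = PySem.Str.join "" (pvBitsB 2 (4 + n % 4)) := by
  have hm : PySem.Int.mod n 4 = n % 4 := PySem.Int.mod_eq_emod_of_pos (by norm_num)
  have h0 : 0 ≤ n % 4 := Int.emod_nonneg n (by norm_num)
  have h4 : n % 4 < 4 := Int.emod_lt_of_pos n (by norm_num)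
  rw [hm]
  have hcases : n % 4 = 0 ∨ n % 4 = 1 ∨ n % 4 = 2 ∨ n % 4 = 3 := by omega
  rcases hcases with h | h | h | h <;> rw [h] <;> decide

-- the outer loop of A appends exactly the bits a-1, …, P-1 of B's single pass
theorem pvOuterA_eq (P n : Int) (hP : 2 < P) :
    ∀ (k : Nat) (a : Int) (pre : String), 3 ≤ a → (P + 1 - a).toNat = k →
    pvOuterA P n a pre
      = pre ++ PySem.Str.join ""
          ((pvBitsB P.toNat (2 ^ P.toNat + PySem.Int.mod n (2 ^ P.toNat))).drop (a.toNat - 1)) := by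
  intro k
  induction k with
  | zero =>
      intro a pre ha hk
      have haP : ¬ a ≤ P := by omega
      rw [pvOuterA.eq_def, dif_neg haP]
      have hdrop : (pvBitsB P.toNat (2 ^ P.toNat + PySem.Int.mod n (2 ^ P.toNat))).drop
          (a.toNat - 1) = [] :=
        List.drop_eq_nil_of_le (by rw [pvBitsB_length]; omega)
      rw [hdrop]
      have hj : PySem.Str.join "" ([] : List String) = "" := rfl
      rw [hj]
      simp
  | succ k ih =>
      intro a pre ha hk
      have haP : a ≤ P := by omega
      rw [pvOuterA.eq_def, dif_pos haP]
      dsimp only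
      set aN := a.toNat with haN
      set PN := P.toNat with hPN
      set sB : Int := 2 ^ PN + PySem.Int.mod n (2 ^ PN) with hsB
      have ha3 : 3 ≤ aN := by omega
      have haPN : aN ≤ PN := by omega
      have hmpos : (0 : Int) < 2 ^ aN := pow_pos (by norm_num) aN
      have hm : PySem.Int.mod n (2 ^ aN) = n % 2 ^ aN := PySem.Int.mod_eq_emod_of_pos hmpos
      have hmgt : 0 ≤ n % 2 ^ aN := Int.emod_nonneg n (ne_of_gt hmpos)
      have he : (2 : Int) ^ aN ≤ 2 ^ aN + PySem.Int.mod n (2 ^ aN) := by rw [hm]; omega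
      have hcast : ((2 : Int) ^ aN) = ((2 ^ aN : Nat) : Int) := by push_cast; ring
      have hfuel : aN ≤ ((2 : Int) ^ aN + PySem.Int.mod n (2 ^ aN)).toNat * 100 + 1000 := by
        have h1 := Int.toNat_le_toNat he
        rw [hcast, Int.toNat_natCast] at h1
        have h2 : aN < 2 ^ aN := Nat.lt_two_pow_self
        omega
      obtain ⟨r, hr⟩ := pvBitsA_prefix aN _ _ [] hfuel he
      rw [hr, List.nil_append]
      have hidx : a - 1 = ((aN - 1 : Nat) : Int) := by omega
      rw [hidx, PySem.List.pyGet?_natCast]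
      have hlen : (pvBitsB aN (2 ^ aN + PySem.Int.mod n (2 ^ aN))).length = aN :=
        pvBitsB_length _ _
      rw [List.getElem?_append_left (by rw [hlen]; omega)]
      have hcong : pvBitsB aN (2 ^ aN + PySem.Int.mod n (2 ^ aN)) = pvBitsB aN sB := by
        apply pvBitsB_congr
        rw [hsB, hm, PySem.Int.mod_eq_emod_of_pos (pow_pos (by norm_num) PN),
          pvMod_pow n aN aN le_rfl, pvMod_pow n aN PN haPN]
      have hLlen : (pvBitsB PN sB).length = PN := pvBitsB_length _ _
      have hlt : aN - 1 < (pvBitsB PN sB).length := by rw [hLlen]; omega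
      have hlt2 : aN - 1 < (pvBitsB aN sB).length := by rw [pvBitsB_length]; omega
      have hsplit : pvBitsB PN sB = pvBitsB aN sB ++ pvBitsB (PN - aN) (pvT^[aN] sB) := by
        rw [← pvBitsB_add]; congr 1; omega
      have hL? : (pvBitsB PN sB)[aN - 1]? = (pvBitsB aN sB)[aN - 1]? := by
        rw [hsplit, List.getElem?_append_left hlt2]
      have hdropc : (pvBitsB PN sB).drop (aN - 1)
          = (pvBitsB PN sB)[aN - 1]'hlt :: (pvBitsB PN sB).drop aN := by
        have h2 : aN - 1 + 1 = aN := by omega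
        rw [List.drop_eq_getElem_cons hlt, h2]
      rw [hcong, ← hL?, List.getElem?_eq_getElem hlt, Option.getD_some]
      rw [ih (a + 1) _ (by omega) (by omega)]
      have h1 : (a + 1).toNat - 1 = aN := by omega
      rw [h1, hdropc, pvJoin_cons, ← String.append_assoc]

-- ===== VERDICT (by name: the statement is the Claim_ definition above) =====
theorem prefixForModClass_spec : Claim_equal_prefixForModClass := by
  intro P n _
  unfold Spec_prefixForModClass prefixForModClass prefixForModClass_alt
  by_cases hP : P > 2
  · rw [if_pos hP]
    dsimp only
    rw [if_pos hP]
    rw [pvOuterA_eq P n hP ((P + 1 - 3).toNat) 3 _ (by norm_num) rfl]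
    have h32 : ((3 : Int).toNat - 1) = 2 := by decide
    rw [h32]
    set PN := P.toNat with hPN
    set sB : Int := 2 ^ PN + PySem.Int.mod n (2 ^ PN) with hsB
    have hPN3 : 3 ≤ PN := by omega
    have hsplit : pvBitsB PN sB = pvBitsB 2 sB ++ pvBitsB (PN - 2) (pvT^[2] sB) := by
      rw [← pvBitsB_add]; congr 1; omega
    have hlen2 : (pvBitsB 2 sB).length = 2 := pvBitsB_length _ _
    have htab : (PySem.List.pyGet? ["11", "01", "10", "00"] (PySem.Int.mod n 4)).getD ""
        = PySem.Str.join "" (pvBitsB 2 sB) := by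
      rw [pvTable n]
      refine congrArg _ (pvBitsB_congr 2 _ _ ?_)
      have e1 : ((4 : Int) + n % 4) % 2 ^ 2 = n % 2 ^ 2 := by norm_num
      have e2 : sB % 2 ^ 2 = n % 2 ^ 2 := by
        rw [hsB, PySem.Int.mod_eq_emod_of_pos (pow_pos (by norm_num) PN)]
        rw [pvMod_pow n 2 PN (by omega)]
      rw [e1, e2]
    rw [htab]
    conv_rhs => rw [hsplit]
    rw [pvJoin_append, hsplit, List.drop_left' hlen2]
  · rw [if_neg hP]
    dsimp only
    rw [if_neg hP]
    rw [pvTable n]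
    refine congrArg _ (congrArg _ ?_)
    rw [PySem.Int.mod_eq_emod_of_pos (by norm_num : (0:Int) < 2 ^ 2)]
    norm_num
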